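-- pv_equiv track=rewrite | github.com/smkuzmin/python-script-sdmerge | sdmerge.py | group_by_root
-- ===== SOURCE A (Python) =====
-- from collections import defaultdict
--
-- def group_by_root(domains, roots):
--     """Группируем домены по их корневому домену"""
--     groups = defaultdict(set)
--     for domain in domains:
--         # Находим, к какому корневому домену относится этот домен
--         assigned = False
--         for root in roots:
--             if domain == root or domain.endswith('.' + root):
--                 groups[root].add(domain)
--                 assigned = True
--                 break
--         if not assigned:
--             # Сирота - считаем его собственным корневым доменом
--             groups[domain].add(domain)
--     return groups
-- ===== SOURCE B (Python) =====
-- def _suffixes(domain):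
--     # domain itself plus the piece after every '.'
--     out = [domain]
--     for k, ch in enumerate(domain):
--         if ch == '.':
--             out.append(domain[k + 1:])
--     return out
--
-- def group_by_root(domains, roots):
--     """Группируем домены по их корневому домену"""
--     # index each root by its first position, once
--     idx = {}
--     i = 0
--     for r in roots:
--         if r not in idx:
--             idx[r] = i
--         i += 1
--     groups = {}
--     for domain in domains:
--         best = None
--         key = domain
--         for cand in _suffixes(domain):
--             j = idx.get(cand)
--             if j is not None and (best is None or j < best):
--                 best = j
--                 key = cand
--         if key in groups:
--             groups[key].add(domain)
--         else:
--             groups[key] = {domain}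
--     return groups
-- ===== Notes on version B (the rewrite author's own statement) =====
-- stated objective: faster
-- what changed: Instead of scanning all roots per domain with a full endswith test each (first match wins), B indexes each root by its first position once, then for each domain walks only the domain's own dot-suffixes and keeps the suffix with the smallest root index, which is exactly the first-matching root.
import Mathlib
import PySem

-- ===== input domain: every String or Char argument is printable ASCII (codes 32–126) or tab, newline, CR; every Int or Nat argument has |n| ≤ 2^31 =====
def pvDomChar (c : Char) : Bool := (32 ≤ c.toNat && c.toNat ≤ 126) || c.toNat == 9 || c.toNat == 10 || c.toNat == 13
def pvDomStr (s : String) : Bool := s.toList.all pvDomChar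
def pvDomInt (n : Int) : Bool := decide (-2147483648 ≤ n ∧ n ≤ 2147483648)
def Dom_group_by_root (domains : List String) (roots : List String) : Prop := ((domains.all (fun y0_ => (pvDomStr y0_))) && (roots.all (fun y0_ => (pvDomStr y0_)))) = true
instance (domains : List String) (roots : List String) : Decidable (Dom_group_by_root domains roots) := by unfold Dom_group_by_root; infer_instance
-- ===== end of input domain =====

-- B replaces A's per-domain scan over all roots (each test a full endswith) by a one-off
-- index of the roots and, per domain, a single pass over the domain's own dot-suffixes
-- keeping the suffix with the smallest root index; objective: faster (O(R + D·L) work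
-- instead of O(D·R·L) string comparisons). Return-value equivalence only (A returns a
-- defaultdict, B a plain dict; neither mutates its arguments).

-- ===== PORT A =====
-- 'domain == root or domain.endswith("." + root)'
def gbrMatch (domain root : String) : Bool :=
  domain == root || PySem.Str.endswith domain ("." ++ root)

-- the inner 'for root in roots: … break' with the 'assigned' flag is the first match: find?
def group_by_root (domains : List String) (roots : List String) : List (String × List String) :=
  (domains.foldl (fun groups domain =>
      match roots.find? (fun root => gbrMatch domain root) with
      | some root => PySem.Dict.modify groups root PySem.Set.empty (fun s => PySem.Set.add s domain)
      | none => PySem.Dict.modify groups domain PySem.Set.empty (fun s => PySem.Set.add s domain))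
    PySem.Dict.empty).items

-- ===== PORT B =====
-- _suffixes(domain): the domain itself plus the piece after every '.'
def suffChars : List Char → List String
  | [] => []
  | c :: rest => if c == '.' then String.ofList rest :: suffChars rest else suffChars rest

def pySuffixes (s : String) : List String := s :: suffChars s.toList

-- 'idx = {}; for r in roots: if r not in idx: idx[r] = i; i += 1'
def buildIdx : List String → Int → PySem.Dict String Int → PySem.Dict String Int
  | [], _, d => d
  | r :: rest, i, d => buildIdx rest (i + 1) (if d.contains r then d else d.insert r i)

-- the inner 'for cand in _suffixes(domain)' loop over state (best, key)
def pickGo (f : String → Option Int) : List String → Option Int × String → Option Int × String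
  | [], st => st
  | s :: rest, (best, key) =>
    match f s, best with
    | none, _ => pickGo f rest (best, key)
    | some j, none => pickGo f rest (some j, s)
    | some j, some b => if j < b then pickGo f rest (some j, s) else pickGo f rest (some b, key)

def group_by_root_alt (domains : List String) (roots : List String) : List (String × List String) :=
  let idx := buildIdx roots 0 PySem.Dict.empty
  (domains.foldl (fun groups domain =>
      let key := (pickGo (fun s => idx.get? s) (pySuffixes domain) (none, domain)).2
      if groups.contains key then
        groups.insert key (PySem.Set.add (groups.getD key PySem.Set.empty) domain)
      else
        groups.insert key (PySem.Set.add PySem.Set.empty domain))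
    PySem.Dict.empty).items

-- ===== PRECONDITION & SPEC =====
def Spec_group_by_root (domains : List String) (roots : List String) (out : List (String × List String)) : Prop := out = group_by_root_alt domains roots
instance (domains : List String) (roots : List String) (out : List (String × List String)) : Decidable (Spec_group_by_root domains roots out) := by unfold Spec_group_by_root; infer_instance

-- ===== CLAIM (what is proved, stated in full; the proofs are below) =====
def Claim_equal_group_by_root : Prop := ∀ (domains : List String) (roots : List String), Dom_group_by_root domains roots → Spec_group_by_root domains roots (group_by_root domains roots)

-- ===== LEMMAS AND PROOFS =====

-- first index (from offset i) of s in the list, as buildIdx records it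
def firstIdxFrom : List String → Int → String → Option Int
  | [], _, _ => none
  | r :: rest, i, s => if s = r then some i else firstIdxFrom rest (i + 1) s

lemma mem_suffChars (l : List Char) (s : String) :
    s ∈ suffChars l ↔ ('.' :: s.toList) <:+ l := by
  induction l with
  | nil => simp [suffChars]
  | cons c rest ih =>
    show s ∈ (if c == '.' then String.ofList rest :: suffChars rest else suffChars rest) ↔ _
    by_cases hc : c = '.'
    · subst hc
      rw [if_pos (by simp)]
      simp only [List.mem_cons, ih, List.suffix_cons_iff]
      constructor
      · rintro (rfl | h)
        · exact Or.inl (by simp)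
        · exact Or.inr h
      · rintro (h | h)
        · left
          have : s.toList = rest := by injection h
          rw [← this, String.ofList_toList]
        · exact Or.inr h
    · rw [if_neg (by simp [hc])]
      rw [ih, List.suffix_cons_iff]
      constructor
      · exact Or.inr
      · rintro (h | h)
        · exact absurd (by injection h : '.' = c).symm hc
        · exact h

lemma gbrMatch_iff (domain r : String) :
    gbrMatch domain r = true ↔ r ∈ pySuffixes domain := by
  have hdot : (("." : String) ++ r).toList = '.' :: r.toList := by
    rw [String.toList_append]; rfl
  simp only [gbrMatch, Bool.or_eq_true, beq_iff_eq, PySem.Str.endswith, hdot,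
    PySem.Chars.endswith_iff, pySuffixes, List.mem_cons, mem_suffChars]
  constructor
  · rintro (rfl | h)
    · exact Or.inl rfl
    · exact Or.inr h
  · rintro (rfl | h)
    · exact Or.inl rfl
    · exact Or.inr h

lemma dict_get?_empty {ν : Type} (s : String) :
    (PySem.Dict.empty : PySem.Dict String ν).get? s = none := rfl

lemma buildIdx_get? (l : List String) (s : String) :
    ∀ (i : Int) (d : PySem.Dict String Int),
      (buildIdx l i d).get? s = (d.get? s).or (firstIdxFrom l i s) := by
  induction l with
  | nil => intro i d; cases h : d.get? s <;> simp [buildIdx, firstIdxFrom, h]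
  | cons r rest ih =>
    intro i d
    by_cases hs : s = r
    · subst hs
      by_cases hc : d.contains s
      · obtain ⟨v, hv⟩ : ∃ v, d.get? s = some v := by
          cases h : d.get? s with
          | none => exact absurd ((PySem.Dict.get?_eq_none_iff_contains d s).mp h) (by simp [hc])
          | some v => exact ⟨v, rfl⟩
        simp [buildIdx, firstIdxFrom, hc, ih, hv]
      · have hn : d.get? s = none := (PySem.Dict.get?_eq_none_iff_contains d s).mpr (by simpa using hc)
        simp [buildIdx, firstIdxFrom, hc, ih, hn, PySem.Dict.get?_insert_self]
    · by_cases hc : d.contains r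
      · simp [buildIdx, firstIdxFrom, hc, ih, hs]
      · simp [buildIdx, firstIdxFrom, hc, ih, hs, PySem.Dict.get?_insert_of_ne d i hs]

lemma firstIdxFrom_shift (l : List String) (s : String) :
    ∀ i : Int, firstIdxFrom l (i + 1) s = (firstIdxFrom l i s).map (· + 1) := by
  induction l with
  | nil => intro i; rfl
  | cons r rest ih =>
    intro i
    by_cases hs : s = r <;> simp [firstIdxFrom, hs, ih (i + 1)]

lemma firstIdxFrom_ge (l : List String) (s : String) :
    ∀ (i v : Int), firstIdxFrom l i s = some v → i ≤ v := by
  induction l with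
  | nil => intro i v h; simp [firstIdxFrom] at h
  | cons r rest ih =>
    intro i v h
    by_cases hs : s = r
    · simp [firstIdxFrom, hs] at h; omega
    · simp only [firstIdxFrom, if_neg hs] at h
      have := ih (i + 1) v h; omega

lemma pick_congr (f g : String → Option Int) (l : List String)
    (h : ∀ s ∈ l, f s = g s) : ∀ st, pickGo f l st = pickGo g l st := by
  induction l with
  | nil => intro st; rfl
  | cons s rest ih =>
    intro ⟨best, key⟩
    have hs : f s = g s := h s (by simp)
    have hrest : ∀ x ∈ rest, f x = g x := fun x hx => h x (by simp [hx])
    cases hg : g s with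
    | none => simp [pickGo, hs, hg, ih hrest]
    | some j =>
      cases best with
      | none => simp [pickGo, hs, hg, ih hrest]
      | some b => by_cases hj : j < b <;> simp [pickGo, hs, hg, hj, ih hrest]

lemma pick_shift (f : String → Option Int) (l : List String) :
    ∀ (best : Option Int) (key : String),
      pickGo (fun s => (f s).map (· + 1)) l (best.map (· + 1), key) =
        ((pickGo f l (best, key)).1.map (· + 1), (pickGo f l (best, key)).2) := by
  induction l with
  | nil => intro best key; rfl
  | cons s rest ih =>
    intro best key
    cases hfs : f s with
    | none =>
      cases best with
      | none => simpa [pickGo, hfs] using ih none key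
      | some b => simpa [pickGo, hfs] using ih (some b) key
    | some j =>
      cases best with
      | none => simpa [pickGo, hfs] using ih (some j) s
      | some b =>
        by_cases hj : j < b
        · have : j + 1 < b + 1 := by omega
          simpa [pickGo, hfs, hj, this] using ih (some j) s
        · have : ¬ j + 1 < b + 1 := by omega
          simpa [pickGo, hfs, hj, this] using ih (some b) key

lemma pick_none (f : String → Option Int) (l : List String)
    (h : ∀ s ∈ l, f s = none) : ∀ st, pickGo f l st = st := by
  induction l with
  | nil => intro st; rfl
  | cons s rest ih =>
    intro ⟨best, key⟩
    simp [pickGo, h s (by simp), ih (fun x hx => h x (by simp [hx]))]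

lemma pick_stay (f : String → Option Int) (b : Int) (k : String) :
    ∀ l, (∀ s ∈ l, ∀ v, f s = some v → ¬ v < b) → pickGo f l (some b, k) = (some b, k) := by
  intro l
  induction l with
  | nil => intro _; rfl
  | cons s rest ih =>
    intro h
    cases hfs : f s with
    | none => simp [pickGo, hfs, ih (fun x hx v hv => h x (by simp [hx]) v hv)]
    | some j =>
      have := h s (by simp) j hfs
      simp [pickGo, hfs, this, ih (fun x hx v hv => h x (by simp [hx]) v hv)]

lemma pick_min (f : String → Option Int) (s0 : String) (v0 : Int) :
    ∀ (l : List String), s0 ∈ l → f s0 = some v0 →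
      (∀ s ∈ l, ∀ v, f s = some v → v0 ≤ v ∧ (v = v0 → s = s0)) →
      ∀ (st : Option Int × String),
        (st.1 = none ∨ ∃ b, st.1 = some b ∧ v0 < b) →
        (pickGo f l st).2 = s0 := by
  intro l
  induction l with
  | nil => intro h; simp at h
  | cons s rest ih =>
    intro hmem hf hmin ⟨best, key⟩ hst
    by_cases hs : s = s0
    · subst hs
      have hstay : ∀ x ∈ rest, ∀ v, f x = some v → ¬ v < v0 := by
        intro x hx v hv
        have := (hmin x (by simp [hx]) v hv).1; omega
      have hgoal : pickGo f rest (some v0, s) = (some v0, s) := pick_stay f v0 s rest hstay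
      cases best with
      | none => simp [pickGo, hf, hgoal]
      | some b =>
        obtain ⟨b', hb', hlt⟩ := hst.resolve_left (by simp)
        have hbb : b = b' := by simpa using hb'
        subst hbb
        simp [pickGo, hf, hlt, hgoal]
    · have hmem' : s0 ∈ rest := by
        cases hmem with
        | head => exact absurd rfl hs
        | tail _ h => exact h
      have hmin' : ∀ x ∈ rest, ∀ v, f x = some v → v0 ≤ v ∧ (v = v0 → x = s0) :=
        fun x hx v hv => hmin x (by simp [hx]) v hv
      cases hfs : f s with
      | none =>
        simp only [pickGo, hfs]
        exact ih hmem' hf hmin' (best, key) hst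
      | some j =>
        have hj : v0 < j := by
          rcases hmin s (by simp) j hfs with ⟨hle, himp⟩
          rcases lt_or_eq_of_le hle with h | h
          · exact h
          · exact absurd (himp h.symm) hs
        cases best with
        | none =>
          simp only [pickGo, hfs]
          exact ih hmem' hf hmin' (some j, s) (Or.inr ⟨j, rfl, hj⟩)
        | some b =>
          obtain ⟨b', hb', hlt⟩ := hst.resolve_left (by simp)
          have hbb : b = b' := by simpa using hb'
          subst hbb
          by_cases hjb : j < b
          · simp only [pickGo, hfs, if_pos hjb]
            exact ih hmem' hf hmin' (some j, s) (Or.inr ⟨j, rfl, hj⟩)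
          · simp only [pickGo, hfs, if_neg hjb]
            exact ih hmem' hf hmin' (some b, key) (Or.inr ⟨b, rfl, hlt⟩)

lemma pick_find (S : List String) (d0 : String) (roots : List String) :
    (pickGo (fun s => firstIdxFrom roots 0 s) S (none, d0)).2 =
      (match roots.find? (fun r => decide (r ∈ S)) with
       | some r => r
       | none => d0) := by
  induction roots with
  | nil =>
    rw [pick_none (fun s => firstIdxFrom [] 0 s) S (fun s _ => rfl)]
    rfl
  | cons r rest ih =>
    by_cases hr : r ∈ S
    · have hfind : (r :: rest).find? (fun x => decide (x ∈ S)) = some r := by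
        simp [hr]
      rw [hfind]
      refine pick_min _ r 0 S hr (by simp [firstIdxFrom]) ?_ (none, d0) (Or.inl rfl)
      intro s hs v hv
      by_cases hsr : s = r
      · subst hsr
        have hv0 : v = 0 := by
          simp [firstIdxFrom] at hv
          omega
        exact ⟨by omega, fun _ => rfl⟩
      · simp only [firstIdxFrom, if_neg hsr] at hv
        have h1 : (1 : Int) ≤ v := firstIdxFrom_ge rest s 1 v hv
        exact ⟨by omega, fun h => absurd (h ▸ h1) (by omega)⟩
    · have hfind : (r :: rest).find? (fun x => decide (x ∈ S)) =
          rest.find? (fun x => decide (x ∈ S)) := by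
        simp [hr]
      rw [hfind, ← ih]
      have hcong : ∀ s ∈ S, firstIdxFrom (r :: rest) 0 s =
          (firstIdxFrom rest 0 s).map (· + 1) := by
        intro s hs
        have hsr : s ≠ r := fun h => hr (h ▸ hs)
        simp only [firstIdxFrom, if_neg hsr]
        exact firstIdxFrom_shift rest s 0
      rw [pick_congr _ _ S hcong (none, d0)]
      have := pick_shift (fun s => firstIdxFrom rest 0 s) S none d0
      simpa using congrArg Prod.snd this

lemma key_eq (roots : List String) (domain : String) :
    (pickGo (fun s => (buildIdx roots 0 PySem.Dict.empty).get? s) (pySuffixes domain) (none, domain)).2 =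
      (match roots.find? (fun root => gbrMatch domain root) with
       | some root => root
       | none => domain) := by
  have h1 : ∀ s ∈ pySuffixes domain,
      (buildIdx roots 0 PySem.Dict.empty).get? s = firstIdxFrom roots 0 s := by
    intro s _
    rw [buildIdx_get?, dict_get?_empty, Option.none_or]
  rw [pick_congr _ _ _ h1 (none, domain), pick_find]
  have h2 : (fun root => gbrMatch domain root) = (fun r => decide (r ∈ pySuffixes domain)) := by
    funext r
    rw [Bool.eq_iff_iff, decide_eq_true_iff]
    exact gbrMatch_iff domain r
  rw [h2]

lemma step_eq (roots : List String) (groups : PySem.Dict String (PySem.Set String)) (domain : String) :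
    (match roots.find? (fun root => gbrMatch domain root) with
      | some root => PySem.Dict.modify groups root PySem.Set.empty (fun s => PySem.Set.add s domain)
      | none => PySem.Dict.modify groups domain PySem.Set.empty (fun s => PySem.Set.add s domain)) =
    (let key := (pickGo (fun s => (buildIdx roots 0 PySem.Dict.empty).get? s) (pySuffixes domain) (none, domain)).2
     if groups.contains key then
       groups.insert key (PySem.Set.add (groups.getD key PySem.Set.empty) domain)
     else
       groups.insert key (PySem.Set.add PySem.Set.empty domain)) := by
  simp only [key_eq]
  set key := (match roots.find? (fun root => gbrMatch domain root) with
    | some root => root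
    | none => domain) with hkey
  have hmod : (match roots.find? (fun root => gbrMatch domain root) with
      | some root => PySem.Dict.modify groups root PySem.Set.empty (fun s => PySem.Set.add s domain)
      | none => PySem.Dict.modify groups domain PySem.Set.empty (fun s => PySem.Set.add s domain)) =
      PySem.Dict.modify groups key PySem.Set.empty (fun s => PySem.Set.add s domain) := by
    rw [hkey]
    cases roots.find? (fun root => gbrMatch domain root) <;> rfl
  rw [hmod]
  by_cases hc : groups.contains key
  · simp [PySem.Dict.modify, hc]
  · have hn : groups.get? key = none :=
      (PySem.Dict.get?_eq_none_iff_contains groups key).mpr (by simpa using hc)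
    simp [PySem.Dict.modify, PySem.Dict.getD, hc, hn]

-- ===== VERDICT (by name: the statement is the Claim_ definition above) =====
theorem group_by_root_spec : Claim_equal_group_by_root := by
  intro domains roots _
  show group_by_root domains roots = group_by_root_alt domains roots
  unfold group_by_root group_by_root_alt
  refine congrArg PySem.Dict.items ?_
  refine List.foldl_ext _ _ _ ?_
  intro groups domain _
  exact step_eq roots groups domain
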